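-- pv_equiv track=rewrite | github.com/wisesky/LeetCode-Practice | hw-oj/hw-hj18.py | isValidMask
-- ===== SOURCE A (Python) =====
-- def isValidMask(binary_mask):
--     pre = '1'
--     if not binary_mask.startswith('1') or binary_mask.endswith('1'):
--         return False
--     switch = False
--     for c in binary_mask:
--         if c != pre:
--             if switch:
--                 return False
--             else:
--                 switch = True
--                 pre = '0'
--     return True
-- ===== SOURCE B (Python) =====
-- def isValidMask(binary_mask):
--     if not binary_mask.startswith('1') or binary_mask.endswith('1'):
--         return False
--     rest = binary_mask.lstrip('1')
--     return all(c == '0' for c in rest[1:])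
-- ===== Notes on version B (the rewrite author's own statement) =====
-- stated objective: simpler
-- what changed: Replaced the stateful switch/pre state-machine loop with a direct decomposition: strip the leading run of ones, skip the single transition character, and check that the remainder is all zeros.
import Mathlib
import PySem

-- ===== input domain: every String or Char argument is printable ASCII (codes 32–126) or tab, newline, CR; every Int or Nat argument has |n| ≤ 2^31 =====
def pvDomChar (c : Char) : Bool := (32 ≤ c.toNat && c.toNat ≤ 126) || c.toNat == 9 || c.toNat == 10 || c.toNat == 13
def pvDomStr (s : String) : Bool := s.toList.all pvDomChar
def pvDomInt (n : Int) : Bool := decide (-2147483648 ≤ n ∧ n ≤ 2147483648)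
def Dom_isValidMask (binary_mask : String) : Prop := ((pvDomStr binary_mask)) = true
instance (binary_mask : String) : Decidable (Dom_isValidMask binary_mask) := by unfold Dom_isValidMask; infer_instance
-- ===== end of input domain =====

-- ===== PORT A =====
-- B replaces A's switch/pre state-machine loop with lstrip-the-leading-ones, skip one char, all-zeros check — simpler decomposition, same cost
def loopA : List Char → Char → Bool → Bool
  | [], _, _ => true
  | c :: cs, pre, sw =>
      if c ≠ pre then
        if sw then false else loopA cs '0' true
      else loopA cs pre sw

def isValidMask (binary_mask : String) : Bool :=
  if !PySem.Str.startswith binary_mask "1" || PySem.Str.endswith binary_mask "1" then false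
  else loopA binary_mask.toList '1' false

-- ===== PORT B =====
def isValidMask_alt (binary_mask : String) : Bool :=
  if !PySem.Str.startswith binary_mask "1" || PySem.Str.endswith binary_mask "1" then false
  else (((binary_mask.toList.dropWhile (· == '1')).drop 1).all (· == '0'))

-- ===== PRECONDITION & SPEC =====
def Spec_isValidMask (binary_mask : String) (out : Bool) : Prop := out = isValidMask_alt binary_mask
instance (binary_mask : String) (out : Bool) : Decidable (Spec_isValidMask binary_mask out) := by unfold Spec_isValidMask; infer_instance

-- ===== CLAIM (what is proved, stated in full; the proofs are below) =====
def Claim_equal_isValidMask : Prop := ∀ (binary_mask : String), Dom_isValidMask binary_mask → Spec_isValidMask binary_mask (isValidMask binary_mask)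

-- ===== LEMMAS AND PROOFS =====
theorem loopA_zero (l : List Char) : loopA l '0' true = l.all (· == '0') := by
  induction l with
  | nil => rfl
  | cons c cs ih =>
      simp only [loopA, List.all_cons]
      by_cases h : c = '0'
      · simp [h, ih]
      · simp [h]

theorem loopA_one (l : List Char) :
    loopA l '1' false = ((l.dropWhile (· == '1')).drop 1).all (· == '0') := by
  induction l with
  | nil => rfl
  | cons c cs ih =>
      by_cases h : c = '1'
      · simp [loopA, h, ih]
      · simp [loopA, h, loopA_zero]

-- ===== VERDICT (by name: the statement is the Claim_ definition above) =====
theorem isValidMask_spec : Claim_equal_isValidMask := by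
  intro s _
  unfold Spec_isValidMask isValidMask isValidMask_alt
  split_ifs with h
  · rfl
  · exact loopA_one s.toList
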